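-- pv_equiv track=rewrite | github.com/google/or-tools | examples/python/pentominoes_sat.py | orientation_is_redundant
-- ===== SOURCE A (Python) =====
-- from typing import Dict, List
--
-- def is_one(mask: List[List[int]], x: int, y: int, orientation: int) -> bool:
--     """Returns true if the oriented piece is 1 at position [i][j].
--
--     The 3 bits in orientation respectively mean: transposition, symmetry by
--     x axis, symmetry by y axis.
--
--     Args:
--       mask: The shape of the piece.
--       x: position.
--       y: position.
--       orientation: between 0 and 7.
--     """
--     if orientation & 1:
--         tmp: int = x
--         x = y
--         y = tmp
--     if orientation & 2:
--         x = len(mask[0]) - 1 - x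
--     if orientation & 4:
--         y = len(mask) - 1 - y
--     return mask[y][x] == 1
--
-- def get_height(mask: List[List[int]], orientation: int) -> int:
--     if orientation & 1:
--         return len(mask[0])
--     return len(mask)
--
-- def get_width(mask: List[List[int]], orientation: int) -> int:
--     if orientation & 1:
--         return len(mask)
--     return len(mask[0])
--
-- def orientation_is_redundant(mask: List[List[int]], orientation: int) -> bool:
--     """Checks if the current rotated figure is the same as a previous rotation."""
--     size_i: int = get_width(mask, orientation)
--     size_j: int = get_height(mask, orientation)
--     for o in range(orientation):
--         if size_i != get_width(mask, o):
--             continue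
--         if size_j != get_height(mask, o):
--             continue
--
--         is_the_same: bool = True
--         for k in range(size_i):
--             if not is_the_same:
--                 break
--             for l in range(size_j):
--                 if not is_the_same:
--                     break
--                 if is_one(mask, k, l, orientation) != is_one(mask, k, l, o):
--                     is_the_same = False
--         if is_the_same:
--             return True
--     return False
-- ===== SOURCE B (Python) =====
-- def oriented_grid(mask, o):
--     """Boolean grid of orientation o, built by whole-list transposition and reversal."""
--     g = [[cell == 1 for cell in row] for row in mask]
--     if not o & 1:
--         g = [list(col) for col in zip(*g)]
--     if (o & 2 and not o & 1) or (o & 4 and o & 1):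
--         g = g[::-1]
--     if (o & 4 and not o & 1) or (o & 2 and o & 1):
--         g = [row[::-1] for row in g]
--     return g
--
--
-- def orientation_is_redundant(mask, orientation):
--     """Checks if the current rotated figure is the same as a previous rotation."""
--     target = oriented_grid(mask, orientation)
--     return any(oriented_grid(mask, o) == target for o in range(min(orientation, 8)))
-- ===== Notes on version B (the rewrite author's own statement) =====
-- stated objective: alternative
-- what changed: B builds each orientation's boolean grid by whole-list operations (transpose via zip(*g), list reversal, row reversal) instead of A's per-cell index arithmetic in a quadruple nested loop with a break flag, and bounds the scan by min(orientation, 8) since the three orientation bits repeat with period 8.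
-- outside the precondition, e.g. on orientation_is_redundant([], 1): A raises IndexError, B returns True; on orientation_is_redundant([[1, 0], [0], [0, 0, 0]], 2): A returns False, B returns True; on orientation_is_redundant([[1, 1], [1]], 1): A raises IndexError, B returns False
import Mathlib
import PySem

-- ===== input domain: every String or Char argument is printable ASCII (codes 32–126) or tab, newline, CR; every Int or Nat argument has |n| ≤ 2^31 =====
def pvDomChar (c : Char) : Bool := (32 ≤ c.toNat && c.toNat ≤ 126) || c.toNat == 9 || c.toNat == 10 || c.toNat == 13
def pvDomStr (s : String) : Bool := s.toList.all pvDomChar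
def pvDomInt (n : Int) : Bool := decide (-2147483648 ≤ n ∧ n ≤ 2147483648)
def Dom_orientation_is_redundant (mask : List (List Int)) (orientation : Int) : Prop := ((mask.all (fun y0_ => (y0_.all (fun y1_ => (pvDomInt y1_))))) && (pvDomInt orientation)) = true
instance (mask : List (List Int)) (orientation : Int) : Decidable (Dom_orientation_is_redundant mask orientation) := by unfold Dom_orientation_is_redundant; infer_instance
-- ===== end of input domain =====

-- B builds each orientation's boolean grid by whole-list transposition/reversal instead of A's
-- per-cell index arithmetic in nested loops, and scans only range(min(orientation, 8)) since the
-- three orientation bits repeat with period 8 (objective: alternative).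

-- ===== PORT A =====
-- Python's `orientation & m` for m ∈ {1,2,4}: bit extraction via floor division / floor mod,
-- exact for all Ints (two's complement semantics of Python's `&` with a power-of-two mask).
def pvBit (orientation : Int) (m : Int) : Bool :=
  PySem.Int.mod (PySem.Int.floordiv orientation m) 2 == 1

def is_one (mask : List (List Int)) (x y orientation : Int) : Bool :=
  let x1 := if pvBit orientation 1 then y else x
  let y1 := if pvBit orientation 1 then x else y
  let x2 := if pvBit orientation 2 then ((mask.headD []).length : Int) - 1 - x1 else x1
  let y2 := if pvBit orientation 4 then ((mask.length : Int)) - 1 - y1 else y1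
  PySem.List.pyGetD (PySem.List.pyGetD mask y2 []) x2 0 == 1

def get_height (mask : List (List Int)) (orientation : Int) : Int :=
  if pvBit orientation 1 then ((mask.headD []).length : Int) else (mask.length : Int)

def get_width (mask : List (List Int)) (orientation : Int) : Int :=
  if pvBit orientation 1 then ((mask.length : Int)) else ((mask.headD []).length : Int)

-- A's `for o in range(orientation)` loop with its `continue`s and early `return True`:
-- a counting recursion (o, remaining fuel = number of iterations left), exactly Python's
-- lazy range iteration; the early `return True` stops the recursion.
def pvALoop (mask : List (List Int)) (orientation size_i size_j o : Int) : Nat → Bool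
  | 0 => false
  | n + 1 =>
    if size_i ≠ get_width mask o then pvALoop mask orientation size_i size_j (o + 1) n
    else if size_j ≠ get_height mask o then pvALoop mask orientation size_i size_j (o + 1) n
    else
      -- the two inner loops with the `is_the_same`/`break` flag: value-wise a threaded && fold
      let is_the_same : Bool :=
        (PySem.List.pyRange 0 size_i 1).foldl (fun s k =>
          (PySem.List.pyRange 0 size_j 1).foldl (fun s l =>
            s && (is_one mask k l orientation == is_one mask k l o)) s) true
      if is_the_same then true else pvALoop mask orientation size_i size_j (o + 1) n

def orientation_is_redundant (mask : List (List Int)) (orientation : Int) : Bool :=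
  let size_i := get_width mask orientation
  let size_j := get_height mask orientation
  pvALoop mask orientation size_i size_j 0 orientation.toNat

-- ===== PORT B =====
-- Source B's `[list(col) for col in zip(*g)]`: zip truncates to the shortest row (length 0 when g = []).
def pyZipStar (g : List (List Bool)) : List (List Bool) :=
  (List.range ((g.map List.length).min?.getD 0)).map (fun i => g.map (fun r => r.getD i false))

def oriented_grid (mask : List (List Int)) (o : Int) : List (List Bool) :=
  let g0 := mask.map (fun row => row.map (fun c => c == 1))
  let g1 := if !pvBit o 1 then pyZipStar g0 else g0
  let g2 := if (pvBit o 2 && !pvBit o 1) || (pvBit o 4 && pvBit o 1) then g1.reverse else g1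
  if (pvBit o 4 && !pvBit o 1) || (pvBit o 2 && pvBit o 1) then g2.map List.reverse else g2

def orientation_is_redundant_alt (mask : List (List Int)) (orientation : Int) : Bool :=
  let target := oriented_grid mask orientation
  (PySem.List.pyRange 0 (min orientation 8) 1).any (fun o => oriented_grid mask o == target)

-- ===== PRECONDITION & SPEC =====
-- Pre_ excludes the empty mask, on which A raises IndexError, and ragged (non-rectangular)
-- masks with positive orientation, on which A raises IndexError on some inputs and on others
-- returns a value produced by out-of-range cell reads that B's whole-grid rendering has no
-- counterpart for (the puzzle pieces this code is written for are rectangular grids).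
def Pre_orientation_is_redundant (mask : List (List Int)) (orientation : Int) : Prop :=
  mask ≠ [] ∧ (orientation ≤ 0 ∨ ∀ row ∈ mask, row.length = (mask.headD []).length)

instance (mask : List (List Int)) (orientation : Int) : Decidable (Pre_orientation_is_redundant mask orientation) := by
  unfold Pre_orientation_is_redundant; infer_instance

def pvWitness_orientation_is_redundant : List (List Int) × Int := ([[1, 0], [1, 1]], 5)

def Spec_orientation_is_redundant (mask : List (List Int)) (orientation : Int) (out : Bool) : Prop := out = orientation_is_redundant_alt mask orientation
instance (mask : List (List Int)) (orientation : Int) (out : Bool) : Decidable (Spec_orientation_is_redundant mask orientation out) := by unfold Spec_orientation_is_redundant; infer_instance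

-- ===== CLAIM (what is proved, stated in full; the proofs are below) =====
def Claim_equal_orientation_is_redundant : Prop := ∀ (mask : List (List Int)) (orientation : Int), Dom_orientation_is_redundant mask orientation → Pre_orientation_is_redundant mask orientation → Spec_orientation_is_redundant mask orientation (orientation_is_redundant mask orientation)

-- ===== LEMMAS AND PROOFS =====

-- `orientation & m` for m ∈ {1,2,4} depends only on orientation mod 8.
theorem pvBit_sub8 (a m : Int) (hm : m = 1 ∨ m = 2 ∨ m = 4) : pvBit (a - 8) m = pvBit a m := by
  rcases hm with h | h | h <;> subst h <;>
    simp only [pvBit, PySem.Int.floordiv_eq_ediv_of_pos (b := 1) (by norm_num),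
      PySem.Int.floordiv_eq_ediv_of_pos (b := 2) (by norm_num),
      PySem.Int.floordiv_eq_ediv_of_pos (b := 4) (by norm_num),
      PySem.Int.mod_eq_emod_of_pos (b := 2) (by norm_num)] <;>
    (congr 1; omega)

theorem pvBit_mod8 (a m : Int) (hm : m = 1 ∨ m = 2 ∨ m = 4) : pvBit (PySem.Int.mod a 8) m = pvBit a m := by
  rw [PySem.Int.mod_eq_emod_of_pos (b := 8) (by norm_num)]
  rcases hm with h | h | h <;> subst h <;>
    simp only [pvBit, PySem.Int.floordiv_eq_ediv_of_pos (b := 1) (by norm_num),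
      PySem.Int.floordiv_eq_ediv_of_pos (b := 2) (by norm_num),
      PySem.Int.floordiv_eq_ediv_of_pos (b := 4) (by norm_num),
      PySem.Int.mod_eq_emod_of_pos (b := 2) (by norm_num)] <;>
    (congr 1; omega)

-- All of A's and B's primitives depend on the orientation only through its three bits.
theorem is_one_congr (mask : List (List Int)) (x y a b : Int)
    (h1 : pvBit a 1 = pvBit b 1) (h2 : pvBit a 2 = pvBit b 2) (h4 : pvBit a 4 = pvBit b 4) :
    is_one mask x y a = is_one mask x y b := by
  simp only [is_one, h1, h2, h4]

theorem get_width_congr (mask : List (List Int)) (a b : Int) (h1 : pvBit a 1 = pvBit b 1) :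
    get_width mask a = get_width mask b := by simp only [get_width, h1]

theorem get_height_congr (mask : List (List Int)) (a b : Int) (h1 : pvBit a 1 = pvBit b 1) :
    get_height mask a = get_height mask b := by simp only [get_height, h1]

theorem oriented_grid_congr (mask : List (List Int)) (a b : Int)
    (h1 : pvBit a 1 = pvBit b 1) (h2 : pvBit a 2 = pvBit b 2) (h4 : pvBit a 4 = pvBit b 4) :
    oriented_grid mask a = oriented_grid mask b := by
  simp only [oriented_grid, h1, h2, h4]

-- the threaded && fold of A's inner loops is `&& all`
theorem pv_foldl_and {α : Type} (xs : List α) (f : α → Bool) (s : Bool) :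
    xs.foldl (fun s a => s && f a) s = (s && xs.all f) := by
  induction xs generalizing s with
  | nil => simp
  | cons a t ih => simp [List.foldl, ih, Bool.and_assoc]

theorem pv_foldl_foldl_and {α β : Type} (xs : List α) (ys : List β)
    (g : α → β → Bool) (s : Bool) :
    xs.foldl (fun s k => ys.foldl (fun s l => s && g k l) s) s
      = (s && xs.all fun k => ys.all (g k)) := by
  induction xs generalizing s with
  | nil => simp
  | cons a t ih => simp [List.foldl, pv_foldl_and, Bool.and_assoc]

-- A's per-iteration test, abbreviated
def pvMatch (mask : List (List Int)) (orientation o : Int) : Bool :=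
  (get_width mask orientation == get_width mask o) &&
  (get_height mask orientation == get_height mask o) &&
  ((PySem.List.pyRange 0 (get_width mask orientation) 1).all fun k =>
    (PySem.List.pyRange 0 (get_height mask orientation) 1).all fun l =>
      is_one mask k l orientation == is_one mask k l o)

theorem pvALoop_eq_any (mask : List (List Int)) (orientation : Int) (n : Nat) (o : Int) :
    pvALoop mask orientation (get_width mask orientation) (get_height mask orientation) o n
      = (PySem.List.pyRange o (o + n) 1).any (pvMatch mask orientation) := by
  induction n generalizing o with
  | zero =>
    simp only [pvALoop, Nat.cast_zero, add_zero]
    rw [PySem.List.pyRange_one_eq_nil (le_refl o)]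
    rfl
  | succ n ih =>
    rw [show (o + (n+1 : Nat) : Int) = (o + 1) + n by push_cast; ring,
        PySem.List.pyRange_one_cons (by omega : o < (o+1) + n)]
    show (if _ ≠ _ then _ else _) = _
    simp only [List.any_cons, ih]
    by_cases hw : get_width mask orientation = get_width mask o
    · by_cases hh : get_height mask orientation = get_height mask o
      · rw [if_neg (by simpa using hw), if_neg (by simpa using hh)]
        rw [pv_foldl_foldl_and, Bool.true_and]
        have hm : pvMatch mask orientation o
            = ((PySem.List.pyRange 0 (get_width mask orientation) 1).all fun k =>
                (PySem.List.pyRange 0 (get_height mask orientation) 1).all fun l =>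
                  is_one mask k l orientation == is_one mask k l o) := by
          simp only [pvMatch, ← hw, ← hh, beq_self_eq_true, Bool.true_and]
        rw [hm]
        by_cases hs : ((PySem.List.pyRange 0 (get_width mask orientation) 1).all fun k =>
            (PySem.List.pyRange 0 (get_height mask orientation) 1).all fun l =>
              is_one mask k l orientation == is_one mask k l o) = true
        · rw [if_pos hs, hs, Bool.true_or]
        · rw [if_neg hs, Bool.eq_false_iff.mpr hs, Bool.false_or]
      · rw [if_neg (by simpa using hw), if_pos hh]
        have : pvMatch mask orientation o = false := by
          simp [pvMatch, hh]
        rw [this]; simp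
    · rw [if_pos hw]
      have : pvMatch mask orientation o = false := by
        simp [pvMatch, hw]
      rw [this]; simp

-- ---------- characterisation of B's grid on rectangular non-empty masks ----------

theorem pv_min_const (xs : List Nat) (W : Nat) (hne : xs ≠ []) (hall : ∀ x ∈ xs, x = W) :
    xs.min?.getD 0 = W := by
  have hW : W ∈ xs := hall _ (List.head_mem hne) ▸ List.head_mem hne
  have h : xs.min? = some W :=
    List.min?_eq_some_iff.mpr ⟨hW, fun b hb => by rw [hall b hb]⟩
  rw [h]; rfl

theorem grid_char (mask : List (List Int)) (hne : mask ≠ [])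
    (hrect : ∀ row ∈ mask, row.length = (mask.headD []).length) (o : Int) :
    oriented_grid mask o
      = (List.range (if pvBit o 1 then mask.length else (mask.headD []).length)).map
          (fun k => (List.range (if pvBit o 1 then (mask.headD []).length else mask.length)).map
            (fun l => is_one mask (Int.ofNat k) (Int.ofNat l) o)) := by
  have hH : 0 < mask.length := List.length_pos_iff.mpr hne
  have hmin : ((mask.map (fun row => row.map (fun c : Int => (c == 1)))).map List.length).min?.getD 0
      = (mask.headD []).length := by
    apply pv_min_const
    · simp [hne]
    · intro x hx
      simp only [List.map_map, List.mem_map, Function.comp] at hx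
      obtain ⟨row, hrow, rfl⟩ := hx
      simp [hrect row hrow]
  have hrowlen : ∀ j (hj : j < mask.length), mask[j].length = (mask.headD []).length := by
    intro j hj; exact hrect _ (List.getElem_mem hj)
  -- the in-range cell as is_one sees it
  have hcell : ∀ (j i : Nat) (hj : j < mask.length) (hi : i < (mask.headD []).length)
      (yi xi : Int), yi = Int.ofNat j → xi = Int.ofNat i →
      (List.map (fun c : Int => c == 1) (mask[j]'hj)).getD i false
        = (PySem.List.pyGetD (PySem.List.pyGetD mask yi []) xi 0 == 1) := by
    intro j i hj hi yi xi hy hx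
    subst hy; subst hx
    have hiw : i < (mask[j]'hj).length := by rw [hrect _ (List.getElem_mem hj)]; exact hi
    rw [List.getD_eq_getElem _ false (by simpa using hiw), List.getElem_map]
    simp only [Int.ofNat_eq_natCast, PySem.List.pyGetD_natCast]
    rw [List.getD_eq_getElem _ [] hj, List.getD_eq_getElem _ 0 hiw]
  have hcellE : ∀ (j i : Nat) (hj : j < mask.length) (hi : i < (mask.headD []).length)
      (yi xi : Int), yi = Int.ofNat j → xi = Int.ofNat i →
      (((mask[j]'hj)[i]'(by rw [hrect _ (List.getElem_mem hj)]; exact hi)) == 1)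
        = (PySem.List.pyGetD (PySem.List.pyGetD mask yi []) xi 0 == 1) := by
    intro j i hj hi yi xi hy hx
    rw [← hcell j i hj hi yi xi hy hx]
    have hiw : i < (mask[j]'hj).length := by rw [hrect _ (List.getElem_mem hj)]; exact hi
    rw [List.getD_eq_getElem _ false (by simpa using hiw), List.getElem_map]
  cases h1 : pvBit o 1 <;> cases h2 : pvBit o 2 <;> cases h4 : pvBit o 4 <;>
    simp only [oriented_grid, pyZipStar, hmin, is_one, h1, h2, h4] <;>
    simp only [Bool.not_true, Bool.not_false, Bool.and_false, Bool.and_true,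
      Bool.or_false, Bool.or_true, Bool.false_eq_true, if_true, if_false] <;>
    apply List.ext_getElem (by simp_all; try omega) <;>
    intro k hk hk' <;>
    apply List.ext_getElem (by simp_all; try omega) <;>
    intro l hl hl' <;>
    simp only [List.getElem_map, List.getElem_range, List.getElem_reverse, List.length_map,
      List.length_range, List.length_reverse, hrowlen] at hk hl ⊢ <;>
    first
      | (refine hcell _ _ ?_ ?_ _ _ ?_ ?_) <;> (try simp only [Int.ofNat_eq_natCast]) <;> omega
      | (refine hcellE _ _ ?_ ?_ _ _ ?_ ?_) <;> (try simp only [Int.ofNat_eq_natCast]) <;> omega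

theorem grid_eq_iff_match (mask : List (List Int)) (hne : mask ≠ [])
    (hrect : ∀ row ∈ mask, row.length = (mask.headD []).length) (orientation o : Int) :
    (oriented_grid mask o == oriented_grid mask orientation) = pvMatch mask orientation o := by
  have hH : 0 < mask.length := List.length_pos_iff.mpr hne
  -- make the width an opaque variable so that simp keeps every occurrence in the same form
  obtain ⟨W, hWdef⟩ : ∃ w, (mask.headD []).length = w := ⟨_, rfl⟩
  have hwidth : ∀ a : Int, get_width mask a = ((if pvBit a 1 then mask.length else W : Nat) : Int) := by
    intro a; unfold get_width; rw [hWdef]; by_cases h : pvBit a 1 <;> simp [h]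
  have hheight : ∀ a : Int, get_height mask a = ((if pvBit a 1 then W else mask.length : Nat) : Int) := by
    intro a; unfold get_height; rw [hWdef]; by_cases h : pvBit a 1 <;> simp [h]
  have hmatch_iff : pvMatch mask orientation o = true ↔
      ((if pvBit orientation 1 then mask.length else W) = (if pvBit o 1 then mask.length else W)
     ∧ (if pvBit orientation 1 then W else mask.length) = (if pvBit o 1 then W else mask.length)
     ∧ ∀ (k l : Nat), k < (if pvBit orientation 1 then mask.length else W) →
          l < (if pvBit orientation 1 then W else mask.length) →
          is_one mask (Int.ofNat k) (Int.ofNat l) orientation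
            = is_one mask (Int.ofNat k) (Int.ofNat l) o) := by
    simp only [pvMatch, Bool.and_eq_true, beq_iff_eq, List.all_eq_true,
      PySem.List.mem_pyRange_one, hwidth, hheight, Nat.cast_inj, Int.ofNat_eq_natCast]
    constructor
    · rintro ⟨⟨hw, hh⟩, hc⟩
      refine ⟨hw, hh, fun k l hk hl => ?_⟩
      have := hc (k : Int) ⟨by omega, by omega⟩ (l : Int) ⟨by omega, by omega⟩
      simpa using this
    · rintro ⟨hw, hh, hc⟩
      refine ⟨⟨hw, hh⟩, fun x hx y hy => ?_⟩
      have hx' : x = ((x.toNat : Nat) : Int) := by omega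
      have hy' : y = ((y.toNat : Nat) : Int) := by omega
      rw [hx', hy']
      have := hc x.toNat y.toNat (by omega) (by omega)
      simpa using this
  rw [Bool.eq_iff_iff, beq_iff_eq, hmatch_iff,
      grid_char mask hne hrect o, grid_char mask hne hrect orientation, hWdef]
  constructor
  · intro h
    have hlen := congrArg List.length h
    simp only [List.length_map, List.length_range] at hlen
    have hrow : ∀ k (hk : k < (if pvBit orientation 1 then mask.length else W)),
        (List.range (if pvBit o 1 then W else mask.length)).map
            (fun l => is_one mask (Int.ofNat k) (Int.ofNat l) o)
          = (List.range (if pvBit orientation 1 then W else mask.length)).map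
            (fun l => is_one mask (Int.ofNat k) (Int.ofNat l) orientation) := by
      intro k hk
      have hk2 : k < ((List.range (if pvBit o 1 then mask.length else W)).map
          (fun k => (List.range (if pvBit o 1 then W else mask.length)).map
            (fun l => is_one mask (Int.ofNat k) (Int.ofNat l) o))).length := by
        simp only [List.length_map, List.length_range]; omega
      have := List.getElem_of_eq h hk2
      simpa using this
    have hhei : (if pvBit orientation 1 then W else mask.length)
        = (if pvBit o 1 then W else mask.length) := by
      by_cases hz : (if pvBit orientation 1 then mask.length else W) = 0
      · have ho1 : pvBit orientation 1 = false := by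
          by_contra hb
          rw [Bool.not_eq_false] at hb
          rw [hb, if_pos rfl] at hz; omega
        have ho2 : pvBit o 1 = false := by
          by_contra hb
          rw [Bool.not_eq_false] at hb
          rw [hb, if_pos rfl, ho1, if_neg (by simp)] at hlen
          rw [ho1, if_neg (by simp)] at hz; omega
        rw [ho1, ho2]
      · have := congrArg List.length (hrow 0 (Nat.pos_of_ne_zero hz))
        simpa using this.symm
    refine ⟨hlen.symm, hhei, ?_⟩
    intro k l hk hl
    have := List.getElem_of_eq (hrow k hk) (i := l)
      (by simpa using hhei ▸ hl)
    simpa using this.symm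
  · rintro ⟨hw, hh, hc⟩
    rw [← hw, ← hh]
    apply List.map_congr_left
    intro k hk
    apply List.map_congr_left
    intro l hl
    rw [List.mem_range] at hk hl
    exact (hc k l hk hl).symm

-- ===== VERDICT (by name: the statement is the Claim_ definition above) =====
theorem orientation_is_redundant_spec : Claim_equal_orientation_is_redundant := by
  intro mask orientation _ hpre
  obtain ⟨hne, hcase⟩ := hpre
  show orientation_is_redundant mask orientation = orientation_is_redundant_alt mask orientation
  unfold orientation_is_redundant orientation_is_redundant_alt
  rw [pvALoop_eq_any]
  by_cases hneg : orientation ≤ 0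
  · rw [PySem.List.pyRange_one_eq_nil (show (0:Int) + ↑orientation.toNat ≤ 0 by omega),
        PySem.List.pyRange_one_eq_nil (show min orientation 8 ≤ 0 by omega)]
    rfl
  · have hrect : ∀ row ∈ mask, row.length = (mask.headD []).length :=
      hcase.resolve_left (by omega)
    rw [show (0:Int) + ↑orientation.toNat = orientation by omega]
    by_cases h8 : orientation ≤ 8
    · rw [min_eq_left h8]
      exact PySem.List.any_congr_mem
        (fun a _ => (grid_eq_iff_match mask hne hrect orientation a).symm)
    · rw [min_eq_right (by omega : (8:Int) ≤ orientation)]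
      have hA : (PySem.List.pyRange 0 orientation 1).any (pvMatch mask orientation) = true := by
        rw [List.any_eq_true]
        refine ⟨orientation - 8, PySem.List.mem_pyRange_one.mpr ⟨by omega, by omega⟩, ?_⟩
        unfold pvMatch
        rw [get_width_congr mask (orientation - 8) orientation (pvBit_sub8 _ _ (Or.inl rfl)),
            get_height_congr mask (orientation - 8) orientation (pvBit_sub8 _ _ (Or.inl rfl))]
        simp only [beq_self_eq_true, Bool.true_and]
        apply List.all_eq_true.mpr; intro k _
        apply List.all_eq_true.mpr; intro l _
        rw [is_one_congr mask k l (orientation - 8) orientation (pvBit_sub8 _ _ (Or.inl rfl))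
            (pvBit_sub8 _ _ (Or.inr (Or.inl rfl))) (pvBit_sub8 _ _ (Or.inr (Or.inr rfl)))]
        exact beq_self_eq_true _
      have hB : (PySem.List.pyRange 0 8 1).any
          (fun o => oriented_grid mask o == oriented_grid mask orientation) = true := by
        rw [List.any_eq_true]
        refine ⟨PySem.Int.mod orientation 8,
          PySem.List.mem_pyRange_one.mpr
            ⟨PySem.Int.mod_nonneg orientation (by norm_num), PySem.Int.mod_lt orientation (by norm_num)⟩, ?_⟩
        rw [oriented_grid_congr mask (PySem.Int.mod orientation 8) orientation
            (pvBit_mod8 _ _ (Or.inl rfl)) (pvBit_mod8 _ _ (Or.inr (Or.inl rfl)))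
            (pvBit_mod8 _ _ (Or.inr (Or.inr rfl)))]
        exact beq_self_eq_true _
      rw [hA, hB]
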